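-- pv_equiv track=rewrite | github.com/GayathriiMadhu/quest_python | Week1/day3/p9_a3.py | find_smallest_and_largest
-- ===== SOURCE A (Python) =====
-- def find_smallest_and_largest(strings):
--     smallest = largest = strings[0]
--     for string in strings[0:]:
--         if string < smallest:
--             smallest = string
--         if string > largest:
--             largest = string
--     return smallest, largest
-- ===== SOURCE B (Python) =====
-- def find_smallest_and_largest(strings):
--     s = sorted(strings)
--     return s[0], s[-1]
-- ===== Notes on version B (the rewrite author's own statement) =====
-- stated objective: simpler
-- what changed: B sorts the list once and reads the minimum and maximum off the two ends, replacing A's combined min/max scan with running accumulators.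
import Mathlib
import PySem

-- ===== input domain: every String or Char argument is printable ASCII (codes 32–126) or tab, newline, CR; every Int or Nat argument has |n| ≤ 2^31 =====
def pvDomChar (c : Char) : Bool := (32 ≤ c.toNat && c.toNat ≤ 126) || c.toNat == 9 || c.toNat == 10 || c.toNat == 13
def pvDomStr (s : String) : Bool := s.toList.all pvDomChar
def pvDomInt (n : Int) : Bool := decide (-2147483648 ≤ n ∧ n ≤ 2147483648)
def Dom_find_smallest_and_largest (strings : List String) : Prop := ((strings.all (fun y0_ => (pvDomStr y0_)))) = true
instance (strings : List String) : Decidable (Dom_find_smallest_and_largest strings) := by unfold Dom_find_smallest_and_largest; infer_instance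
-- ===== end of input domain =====

-- B sorts once and takes the two ends instead of A's single accumulator scan; objective: simpler.

-- ===== PORT A =====
def find_smallest_and_largest (strings : List String) : String × String :=
  match PySem.List.pyGet? strings 0 with
  | none => ("", "")  -- strings[0] raises IndexError on []; excluded by Pre_
  | some h =>
    (PySem.List.slice strings (some 0) none).foldl
      (fun p s => (if s < p.1 then s else p.1, if p.2 < s then s else p.2)) (h, h)

-- ===== PORT B =====
def find_smallest_and_largest_alt (strings : List String) : String × String :=
  let s := PySem.List.sorted strings (fun x => x) false
  match PySem.List.pyGet? s 0, PySem.List.pyGet? s (-1) with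
  | some a, some b => (a, b)
  | _, _ => ("", "")  -- s[0] raises IndexError on []; excluded by Pre_

-- ===== PRECONDITION & SPEC =====
-- Pre_ excludes only the empty list, on which both Pythons raise IndexError.
def Pre_find_smallest_and_largest (strings : List String) : Prop := strings ≠ []
instance (strings : List String) : Decidable (Pre_find_smallest_and_largest strings) := by unfold Pre_find_smallest_and_largest; infer_instance
def pvWitness_find_smallest_and_largest : List String := ["b", "a", "c"]

def Spec_find_smallest_and_largest (strings : List String) (out : String × String) : Prop := out = find_smallest_and_largest_alt strings
instance (strings : List String) (out : String × String) : Decidable (Spec_find_smallest_and_largest strings out) := by unfold Spec_find_smallest_and_largest; infer_instance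

-- ===== CLAIM (what is proved, stated in full; the proofs are below) =====
def Claim_equal_find_smallest_and_largest : Prop := ∀ (strings : List String), Dom_find_smallest_and_largest strings → Pre_find_smallest_and_largest strings → Spec_find_smallest_and_largest strings (find_smallest_and_largest strings)

-- ===== LEMMAS AND PROOFS =====

-- A's fold computes a running minimum/maximum: characterise the result.
theorem fold_min_max (l : List String) (a b : String) :
    (((l.foldl (fun p s => (if s < p.1 then s else p.1, if p.2 < s then s else p.2)) (a, b)).1 = a
        ∨ (l.foldl (fun p s => (if s < p.1 then s else p.1, if p.2 < s then s else p.2)) (a, b)).1 ∈ l)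
      ∧ (l.foldl (fun p s => (if s < p.1 then s else p.1, if p.2 < s then s else p.2)) (a, b)).1 ≤ a
      ∧ ∀ y ∈ l, (l.foldl (fun p s => (if s < p.1 then s else p.1, if p.2 < s then s else p.2)) (a, b)).1 ≤ y)
    ∧ (((l.foldl (fun p s => (if s < p.1 then s else p.1, if p.2 < s then s else p.2)) (a, b)).2 = b
        ∨ (l.foldl (fun p s => (if s < p.1 then s else p.1, if p.2 < s then s else p.2)) (a, b)).2 ∈ l)
      ∧ b ≤ (l.foldl (fun p s => (if s < p.1 then s else p.1, if p.2 < s then s else p.2)) (a, b)).2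
      ∧ ∀ y ∈ l, y ≤ (l.foldl (fun p s => (if s < p.1 then s else p.1, if p.2 < s then s else p.2)) (a, b)).2) := by
  induction l generalizing a b with
  | nil => simp
  | cons x t ih =>
    simp only [List.foldl_cons]
    obtain ⟨⟨hm_mem, hm_le, hm_all⟩, ⟨hM_mem, hM_le, hM_all⟩⟩ :=
      ih (if x < a then x else a) (if b < x then x else b)
    constructor
    · refine ⟨?_, ?_, ?_⟩
      · rcases hm_mem with h | h
        · rw [h]; split_ifs with hx
          · exact Or.inr (List.mem_cons_self)
          · exact Or.inl rfl
        · exact Or.inr (List.mem_cons_of_mem _ h)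
      · refine le_trans hm_le ?_
        split_ifs with hx
        · exact le_of_lt hx
        · exact le_refl a
      · intro y hy
        rcases List.mem_cons.mp hy with rfl | hy
        · refine le_trans hm_le ?_
          split_ifs with hx
          · exact le_refl y
          · exact le_of_not_gt hx
        · exact hm_all y hy
    · refine ⟨?_, ?_, ?_⟩
      · rcases hM_mem with h | h
        · rw [h]; split_ifs with hx
          · exact Or.inr (List.mem_cons_self)
          · exact Or.inl rfl
        · exact Or.inr (List.mem_cons_of_mem _ h)
      · refine le_trans ?_ hM_le
        split_ifs with hx
        · exact le_of_lt hx
        · exact le_refl b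
      · intro y hy
        rcases List.mem_cons.mp hy with rfl | hy
        · refine le_trans ?_ hM_le
          split_ifs with hx
          · exact le_refl y
          · exact le_of_not_gt hx
        · exact hM_all y hy

-- in a (· ≤ ·)-pairwise list every member is ≤ the last element
theorem mem_le_getLast (l : List String) (hp : l.Pairwise (· ≤ ·)) (L : String)
    (hL : l.getLast? = some L) : ∀ y ∈ l, y ≤ L := by
  induction l with
  | nil => simp
  | cons x t ih =>
    intro y hy
    cases t with
    | nil =>
      simp at hL hy
      simp [hy, hL]
    | cons z u =>
      rw [List.getLast?_cons_cons] at hL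
      rcases List.mem_cons.mp hy with rfl | hy
      · have hz : y ≤ z := (List.pairwise_cons.mp hp).1 z List.mem_cons_self
        have := ih (List.pairwise_cons.mp hp).2 hL z List.mem_cons_self
        exact le_trans hz this
      · exact ih (List.pairwise_cons.mp hp).2 hL y hy

theorem find_smallest_and_largest_eq (strings : List String)
    (hne : strings ≠ []) :
    find_smallest_and_largest strings = find_smallest_and_largest_alt strings := by
  obtain ⟨h, t, rfl⟩ := List.exists_cons_of_ne_nil hne
  -- A's side
  unfold find_smallest_and_largest
  rw [PySem.List.pyGet?_zero_cons]
  simp only [PySem.List.slice_zero_start, PySem.List.slice_none_none]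
  obtain ⟨⟨hm_mem, hm_le, hm_all⟩, ⟨hM_mem, hM_le, hM_all⟩⟩ := fold_min_max t h h
  set A := (t.foldl (fun p s => (if s < p.1 then s else p.1, if p.2 < s then s else p.2)) (h, h)) with hA
  have hA1_mem : A.1 ∈ h :: t := by
    rcases hm_mem with h1 | h1
    · rw [h1]; exact List.mem_cons_self
    · exact List.mem_cons_of_mem _ h1
  have hA1_min : ∀ y ∈ h :: t, A.1 ≤ y := by
    intro y hy; rcases List.mem_cons.mp hy with rfl | hy
    · exact hm_le
    · exact hm_all y hy
  have hA2_mem : A.2 ∈ h :: t := by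
    rcases hM_mem with h1 | h1
    · rw [h1]; exact List.mem_cons_self
    · exact List.mem_cons_of_mem _ h1
  have hA2_max : ∀ y ∈ h :: t, y ≤ A.2 := by
    intro y hy; rcases List.mem_cons.mp hy with rfl | hy
    · exact hM_le
    · exact hM_all y hy
  -- B's side
  unfold find_smallest_and_largest_alt
  have hsne : PySem.List.sorted (h :: t) (fun x => x) false ≠ [] := by
    intro hc
    exact (List.cons_ne_nil h t) ((PySem.List.sorted_eq_nil_iff _ _ _).mp hc)
  obtain ⟨m, t', hs⟩ := List.exists_cons_of_ne_nil hsne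
  have hperm : (PySem.List.sorted (h :: t) (fun x => x) false).Perm (h :: t) :=
    PySem.List.sorted_perm _ _ _
  have hpw : (PySem.List.sorted (h :: t) (fun x => x) false).Pairwise (· ≤ ·) :=
    PySem.List.sorted_pairwise _ _
  obtain ⟨L, hL⟩ : ∃ L, (PySem.List.sorted (h :: t) (fun x => x) false).getLast? = some L := by
    rw [hs]; exact ⟨(m :: t').getLast (List.cons_ne_nil _ _), List.getLast?_eq_some_getLast (List.cons_ne_nil _ _)⟩
  have hm_in : m ∈ h :: t := hperm.mem_iff.mp (hs ▸ List.mem_cons_self)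
  have hL_in : L ∈ h :: t := hperm.mem_iff.mp (List.mem_of_getLast? hL)
  have hm_min : ∀ y ∈ h :: t, m ≤ y := fun y hy => PySem.List.key_head_sorted_le _ _ hs y hy
  have hL_max : ∀ y ∈ h :: t, y ≤ L := by
    intro y hy
    exact mem_le_getLast _ hpw L hL y (hperm.mem_iff.mpr hy)
  rw [hs]
  simp only [PySem.List.pyGet?_zero_cons, PySem.List.pyGet?_neg_one]
  rw [← hs, hL]
  have e1 : A.1 = m := le_antisymm (hA1_min m hm_in) (hm_min A.1 hA1_mem)
  have e2 : A.2 = L := le_antisymm (hL_max A.2 hA2_mem) (hA2_max L hL_in)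
  simp only [← e1, ← e2, List.foldl_cons, lt_irrefl, ite_self, ← hA]

-- ===== VERDICT (by name: the statement is the Claim_ definition above) =====
theorem find_smallest_and_largest_spec : Claim_equal_find_smallest_and_largest := by
  intro strings _ hpre
  exact find_smallest_and_largest_eq strings hpre
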